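-- pv_equiv track=rewrite | github.com/Kleinschock/ShaderRunner | Search.py | should_skip_dir
-- ===== SOURCE A (Python) =====
-- from typing import Dict, List, Tuple, Optional, Iterable
--
-- def should_skip_dir(dirname: str, patterns: List[str]) -> bool:
--     for p in patterns:
--         if p.endswith("*"):
--             if dirname.startswith(p[:-1]):
--                 return True
--         else:
--             if dirname == p:
--                 return True
--     return False
-- ===== SOURCE B (Python) =====
-- def should_skip_dir(dirname, patterns):
--     pats = set(patterns)
--     if dirname in pats:
--         return True
--     lengths = {len(p) - 1 for p in pats if p.endswith("*")}
--     return any(i <= len(dirname) and dirname[:i] + "*" in pats for i in lengths)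
-- ===== Notes on version B (the rewrite author's own statement) =====
-- stated objective: alternative
-- what changed: B inverts the traversal direction: it builds a set of the patterns once, collects the set of prefix lengths occurring among wildcard patterns, and then answers by generating candidate keys from the query (dirname itself plus each such prefix of dirname with '*' appended) and testing set membership, instead of A's loop over patterns testing each for a trailing-'*' prefix match or exact equality.
import Mathlib
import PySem

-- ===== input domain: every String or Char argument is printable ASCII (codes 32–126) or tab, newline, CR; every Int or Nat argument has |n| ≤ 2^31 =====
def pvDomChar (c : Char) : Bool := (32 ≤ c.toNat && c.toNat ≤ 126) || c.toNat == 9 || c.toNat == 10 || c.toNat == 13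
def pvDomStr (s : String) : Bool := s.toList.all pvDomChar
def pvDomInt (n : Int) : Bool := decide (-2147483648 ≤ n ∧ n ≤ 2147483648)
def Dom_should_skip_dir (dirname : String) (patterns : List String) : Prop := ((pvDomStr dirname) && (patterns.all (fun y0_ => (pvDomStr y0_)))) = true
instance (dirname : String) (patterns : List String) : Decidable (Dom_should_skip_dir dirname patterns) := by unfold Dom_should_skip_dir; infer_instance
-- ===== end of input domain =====

-- B inverts the traversal: instead of testing each pattern against dirname, it builds a set of
-- the patterns once and generates the candidate keys that could match dirname (dirname itself,
-- and each prefix of dirname of a length occurring among the wildcard patterns, with "*"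
-- appended), answering by set membership (objective: alternative).

-- ===== PORT A =====
def should_skip_dir (dirname : String) (patterns : List String) : Bool :=
  match patterns with
  | [] => false
  | p :: rest =>
    if PySem.Str.endswith p "*" then
      if PySem.Str.startswith dirname (PySem.Str.slice p none (some (-1))) then true
      else should_skip_dir dirname rest
    else
      if dirname == p then true
      else should_skip_dir dirname rest

-- ===== PORT B =====
def should_skip_dir_alt (dirname : String) (patterns : List String) : Bool :=
  let pats := PySem.Set.ofList patterns
  if PySem.Set.contains pats dirname then true
  else
    let lengths := PySem.Set.ofList
      ((pats.filter (fun p => PySem.Str.endswith p "*")).map (fun p => PySem.Str.len p - 1))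
    lengths.any (fun i => decide (i ≤ PySem.Str.len dirname) &&
      PySem.Set.contains pats (PySem.Str.slice dirname none (some i) ++ "*"))

-- ===== PRECONDITION & SPEC =====
def Spec_should_skip_dir (dirname : String) (patterns : List String) (out : Bool) : Prop := out = should_skip_dir_alt dirname patterns
instance (dirname : String) (patterns : List String) (out : Bool) : Decidable (Spec_should_skip_dir dirname patterns out) := by unfold Spec_should_skip_dir; infer_instance

-- ===== CLAIM =====
def Claim_equal_should_skip_dir : Prop := ∀ (dirname : String) (patterns : List String), Dom_should_skip_dir dirname patterns → Spec_should_skip_dir dirname patterns (should_skip_dir dirname patterns)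

-- ===== LEMMAS AND PROOFS =====

lemma set_contains_ofList (ps : List String) (x : String) :
    PySem.Set.contains (PySem.Set.ofList ps) x = true ↔ x ∈ ps := by
  simp only [PySem.Set.contains]
  rw [List.contains_iff_mem]
  exact PySem.Set.mem_ofList (α := String) ps x

-- A's per-pattern test, as a single boolean predicate.
def pvMatch (dirname p : String) : Bool :=
  if PySem.Str.endswith p "*" then PySem.Str.startswith dirname (PySem.Str.slice p none (some (-1)))
  else dirname == p

lemma a_eq_any (dirname : String) (patterns : List String) :
    should_skip_dir dirname patterns = patterns.any (pvMatch dirname) := by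
  induction patterns with
  | nil => rfl
  | cons p rest ih =>
    simp only [should_skip_dir, List.any_cons, pvMatch]
    by_cases h1 : PySem.Str.endswith p "*" = true
    · rw [if_pos h1, if_pos h1]
      cases PySem.Str.startswith dirname (PySem.Str.slice p none (some (-1))) <;> simp [ih]
    · rw [if_neg h1, if_neg h1]
      cases hd : (dirname == p) <;> simp [ih]

-- a candidate key p matches dirname per A's test iff p is dirname itself or a prefix of
-- dirname with '*' appended
lemma match_iff_candidate (d p : String) :
    pvMatch d p = true ↔
      (p = d ∨ ∃ i : Int, 0 ≤ i ∧ i < PySem.Str.len d + 1 ∧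
        p = PySem.Str.slice d none (some i) ++ "*") := by
  unfold pvMatch
  by_cases he : PySem.Str.endswith p "*" = true
  · rw [if_pos he]
    rw [show (PySem.Str.startswith d (PySem.Str.slice p none (some (-1))) = true) ↔
        (PySem.Str.slice p none (some (-1))).toList <+: d.toList from by
      simp [PySem.Chars.startswith_iff]]
    have hsuf : ['*'] <:+ p.toList := by
      have := (PySem.Chars.endswith_iff p.toList "*".toList).mp (by simpa using he)
      simpa using this
    obtain ⟨q, hq⟩ := hsuf
    have hdrop : (PySem.Str.slice p none (some (-1))).toList = q := by
      rw [PySem.Str.slice_to_neg_one, ← hq]; simp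
    rw [hdrop]
    constructor
    · intro hpre
      right
      refine ⟨(q.length : Int), by positivity, ?_, ?_⟩
      · have h1 := hpre.length_le
        have h2 := String.length_toList (s := d)
        simp only [PySem.Str.len_eq]
        omega
      · apply String.toList_inj.mp
        rw [← hq]
        simp only [String.toList_append, PySem.Str.toList_slice, PySem.Chars.slice_eq_listSlice,
          PySem.List.slice_to_natCast, show ("*" : String).toList = ['*'] from by decide]
        congr 1
        exact List.prefix_iff_eq_take.mp hpre
    · rintro (rfl | ⟨i, hi0, hilt, hpeq⟩)
      · rw [← hq]; exact List.prefix_append q ['*']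
      · have htl : p.toList = (PySem.Str.slice d none (some i)).toList ++ ['*'] := by
          rw [hpeq]; simp [show ("*" : String).toList = ['*'] from by decide]
        have hq2 : q = (PySem.Str.slice d none (some i)).toList := by
          have h := hq; rw [htl] at h
          exact List.append_cancel_right h
        rw [hq2]
        rw [show (PySem.Str.slice d none (some i)).toList = d.toList.take i.toNat from by
          simp [PySem.List.slice_to _ hi0]]
        exact List.take_prefix _ _
  · rw [if_neg he]
    rw [beq_iff_eq]
    constructor
    · intro h; left; exact h.symm
    · rintro (rfl | ⟨i, hi0, hilt, hpeq⟩)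
      · rfl
      · exfalso; apply he
        have : "*".toList <:+ p.toList := by
          rw [hpeq]
          simp [show ("*" : String).toList = ['*'] from by decide]
        exact (PySem.Str.endswith_eq p "*") ▸ (PySem.Chars.endswith_iff _ _).mpr this

lemma b_iff (dirname : String) (patterns : List String) :
    should_skip_dir_alt dirname patterns = true ↔
      (dirname ∈ patterns ∨ ∃ i : Int,
        (∃ p ∈ patterns, PySem.Str.endswith p "*" = true ∧ i = PySem.Str.len p - 1) ∧
        i ≤ PySem.Str.len dirname ∧
        (PySem.Str.slice dirname none (some i) ++ "*") ∈ patterns) := by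
  show (if PySem.Set.contains (PySem.Set.ofList patterns) dirname then true
    else (PySem.Set.ofList
        (((PySem.Set.ofList patterns).filter (fun p => PySem.Str.endswith p "*")).map
          (fun p => PySem.Str.len p - 1))).any
      (fun i => decide (i ≤ PySem.Str.len dirname) &&
        PySem.Set.contains (PySem.Set.ofList patterns)
          (PySem.Str.slice dirname none (some i) ++ "*"))) = true ↔ _
  split_ifs with h
  · simp only [true_iff]
    left; exact (set_contains_ofList patterns dirname).mp h
  · rw [List.any_eq_true]
    constructor
    · rintro ⟨i, hmem, hc⟩
      rw [Bool.and_eq_true, decide_eq_true_iff] at hc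
      right
      refine ⟨i, ?_, hc.1, (set_contains_ofList _ _).mp hc.2⟩
      rw [PySem.Set.mem_ofList, List.mem_map] at hmem
      obtain ⟨p, hp, rfl⟩ := hmem
      rw [List.mem_filter] at hp
      exact ⟨p, (PySem.Set.mem_ofList _ _).mp hp.1, hp.2, rfl⟩
    · rintro (hd | ⟨i, ⟨p, hp, hpe, rfl⟩, hile, hmem⟩)
      · exact absurd ((set_contains_ofList patterns dirname).mpr hd) h
      · refine ⟨PySem.Str.len p - 1, ?_, ?_⟩
        · rw [PySem.Set.mem_ofList, List.mem_map]
          exact ⟨p, List.mem_filter.mpr ⟨(PySem.Set.mem_ofList _ _).mpr hp, hpe⟩, rfl⟩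
        · rw [Bool.and_eq_true, decide_eq_true_iff]
          exact ⟨hile, (set_contains_ofList _ _).mpr hmem⟩

-- the two candidate descriptions (all lengths 0..len d vs lengths coming from a wildcard
-- pattern) pick out the same members of patterns
lemma candidates_agree (d : String) (patterns : List String) :
    (∃ i : Int, 0 ≤ i ∧ i < PySem.Str.len d + 1 ∧
        (PySem.Str.slice d none (some i) ++ "*") ∈ patterns) ↔
      (∃ i : Int,
        (∃ p ∈ patterns, PySem.Str.endswith p "*" = true ∧ i = PySem.Str.len p - 1) ∧
        i ≤ PySem.Str.len d ∧
        (PySem.Str.slice d none (some i) ++ "*") ∈ patterns) := by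
  constructor
  · rintro ⟨i, hi0, hilt, hmem⟩
    have hlen : PySem.Str.len (PySem.Str.slice d none (some i) ++ "*") - 1 = i := by
      have h1 : (PySem.Str.slice d none (some i)).toList = d.toList.take i.toNat := by
        simp [PySem.List.slice_to _ hi0]
      rw [PySem.Str.len_append]
      simp only [PySem.Str.len_eq, h1, List.length_take,
        show ("*" : String).toList = ['*'] from by decide, List.length_cons, List.length_nil]
      simp only [PySem.Str.len_eq] at hilt
      omega
    refine ⟨i, ⟨_, hmem, ?_, hlen.symm⟩, by omega, hmem⟩
    have : "*".toList <:+ (PySem.Str.slice d none (some i) ++ "*").toList := by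
      simp [show ("*" : String).toList = ['*'] from by decide]
    exact (PySem.Str.endswith_eq _ "*") ▸ (PySem.Chars.endswith_iff _ _).mpr this
  · rintro ⟨i, ⟨p, _, hpe, rfl⟩, hile, hmem⟩
    have hne : p.toList ≠ [] := by
      intro hnil
      have := (PySem.Chars.endswith_iff p.toList "*".toList).mp (by simpa using hpe)
      rw [hnil] at this
      simpa [show ("*" : String).toList = ['*'] from by decide] using this.length_le
    have : 1 ≤ p.toList.length := by
      cases hl : p.toList with
      | nil => exact absurd hl hne
      | cons a l => simp
    have h2 := String.length_toList (s := p)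
    refine ⟨PySem.Str.len p - 1, ?_, by omega, hmem⟩
    simp only [PySem.Str.len_eq]
    omega

-- ===== VERDICT =====
theorem should_skip_dir_spec : Claim_equal_should_skip_dir := by
  intro dirname patterns _
  unfold Spec_should_skip_dir
  rw [Bool.eq_iff_iff, a_eq_any, List.any_eq_true, b_iff, ← candidates_agree]
  constructor
  · rintro ⟨p, hp, hm⟩
    rcases (match_iff_candidate dirname p).mp hm with rfl | ⟨i, hi0, hilt, rfl⟩
    · exact Or.inl hp
    · exact Or.inr ⟨i, hi0, hilt, hp⟩
  · rintro (hd | ⟨i, hi0, hilt, hmem⟩)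
    · exact ⟨dirname, hd, (match_iff_candidate _ _).mpr (Or.inl rfl)⟩
    · exact ⟨_, hmem, (match_iff_candidate _ _).mpr (Or.inr ⟨i, hi0, hilt, rfl⟩)⟩
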